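-- pv_equiv track=rewrite | github.com/RetoHe/university | 1.semester/softwareengineering/zustandsautomat_example.py | automatatest
-- ===== SOURCE A (Python) =====
-- def automatatest(input_string):
--     state = 0
--
--     for char in input_string:
--         if state == 0 and char == "a:" :
--             state = 1
--         elif state == 1 and char in ("b", "c"):
--             state = 3
--         elif state == 3 and char == "a":
--             state = 4
--         else:
--             state = 2
--
--     return state == 4
-- ===== SOURCE B (Python) =====
-- def automatatest(input_string):
--     # The fixed DFA's intended accepted language is exactly a(b|c)a,
--     # i.e. the two strings "aba" and "aca": test membership directly.
--     return input_string in ("aba", "aca")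
-- ===== Notes on version B (the rewrite author's own statement) =====
-- stated objective: simpler
-- what changed: Replaced the per-character DFA simulation loop with a direct membership test against the DFA's finite accepted language {"aba", "aca"} (no loop, no state variable).
-- intended difference: On exactly the inputs "aba" and "aca" A returns False (its first transition compares a single character to the two-character literal "a:" so it can never fire and A rejects everything), while B returns True, the intended behaviour of a DFA accepting a(b|c)a. — e.g. on automatatest("aba"): A returns false, B returns true
import Mathlib
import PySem

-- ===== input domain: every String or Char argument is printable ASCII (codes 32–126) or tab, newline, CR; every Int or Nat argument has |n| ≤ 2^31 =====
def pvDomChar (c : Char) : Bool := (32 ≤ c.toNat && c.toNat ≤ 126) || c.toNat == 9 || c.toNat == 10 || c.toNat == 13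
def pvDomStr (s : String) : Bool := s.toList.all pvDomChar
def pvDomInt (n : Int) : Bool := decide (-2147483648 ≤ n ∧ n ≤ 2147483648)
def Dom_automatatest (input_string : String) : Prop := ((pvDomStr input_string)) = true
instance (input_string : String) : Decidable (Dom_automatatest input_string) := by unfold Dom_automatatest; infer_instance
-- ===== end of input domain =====

-- B replaces A's DFA-simulation loop by a direct membership test against the DFA's
-- finite accepted language; A's first transition is dead ("a:" never equals a char), see D_ below.

-- ===== PORT A =====
-- one step of A's if/elif chain ('char == "a:"' compares the 1-char string to "a:", as in Python)
def automatatestStep (state : Int) (c : Char) : Int :=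
  if state = 0 ∧ String.ofList [c] = "a:" then 1
  else if state = 1 ∧ (c = 'b' ∨ c = 'c') then 3
  else if state = 3 ∧ c = 'a' then 4
  else 2

def automatatest (input_string : String) : Bool :=
  (input_string.toList.foldl automatatestStep 0) == 4

-- ===== PORT B =====
def automatatest_alt (input_string : String) : Bool :=
  input_string == "aba" || input_string == "aca"

-- ===== PRECONDITION & SPEC =====
-- On exactly the inputs "aba" and "aca" A returns False (its first transition compares a character to
-- the two-character literal "a:" so it can never fire and A rejects everything), while B returns True,
-- the intended behaviour of a DFA accepting a(b|c)a.
def D_automatatest (input_string : String) : Prop :=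
  input_string = "aba" ∨ input_string = "aca"
instance (input_string : String) : Decidable (D_automatatest input_string) := by unfold D_automatatest; infer_instance

def Spec_automatatest (input_string : String) (out : Bool) : Prop :=
  ¬ D_automatatest input_string → out = automatatest_alt input_string
instance (input_string : String) (out : Bool) : Decidable (Spec_automatatest input_string out) := by unfold Spec_automatatest; infer_instance

def pvDiffWitness_automatatest : String := "aba"
def pvDiffWitnessOut_automatatest : Bool × Bool := (false, true)

-- ===== CLAIM (what is proved, stated in full; the proofs are below) =====
def Claim_unchanged_automatatest : Prop := ∀ (input_string : String), Dom_automatatest input_string → Spec_automatatest input_string (automatatest input_string)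
def Claim_changed_automatatest : Prop := Dom_automatatest (pvDiffWitness_automatatest) ∧ D_automatatest (pvDiffWitness_automatatest) ∧ automatatest (pvDiffWitness_automatatest) = pvDiffWitnessOut_automatatest.1 ∧ automatatest_alt (pvDiffWitness_automatatest) = pvDiffWitnessOut_automatatest.2 ∧ pvDiffWitnessOut_automatatest.1 ≠ pvDiffWitnessOut_automatatest.2
def Claim_exact_automatatest : Prop := ∀ (input_string : String), Dom_automatatest input_string → D_automatatest input_string → automatatest input_string ≠ automatatest_alt input_string

-- ===== LEMMAS AND PROOFS =====

-- A's first branch is dead: a 1-char string never equals "a:"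
theorem stepA_ne (c : Char) : ¬ (String.ofList [c] = "a:") := by
  intro h
  have := congrArg String.toList h
  simp at this

-- from state 2, A's fold stays at 2
theorem foldA_trap (l : List Char) : l.foldl automatatestStep 2 = 2 := by
  induction l with
  | nil => rfl
  | cons c l ih =>
    simp only [List.foldl_cons]
    have : automatatestStep 2 c = 2 := by simp [automatatestStep]
    rw [this, ih]

-- A's fold from 0 never reaches 4: the first character already sends it to the trap
theorem automatatest_false (s : String) : automatatest s = false := by
  unfold automatatest
  cases h : s.toList with
  | nil => simp
  | cons c l =>
    simp only [List.foldl_cons]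
    have : automatatestStep 0 c = 2 := by simp [automatatestStep, stepA_ne c]
    rw [this, foldA_trap]
    decide

theorem alt_true_iff (s : String) :
    automatatest_alt s = true ↔ D_automatatest s := by
  simp [automatatest_alt, D_automatatest]

-- ===== VERDICT (by name: the statement is the Claim_ definition above) =====
theorem automatatest_spec : Claim_unchanged_automatatest := by
  intro s _ hD
  rw [automatatest_false]
  rcases hb : automatatest_alt s with _ | _
  · rfl
  · exact absurd ((alt_true_iff s).mp hb) hD

theorem automatatest_changed : Claim_changed_automatatest := by
  unfold Claim_changed_automatatest; decide

theorem automatatest_tight : Claim_exact_automatatest := by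
  intro s _ hD
  rw [automatatest_false, (alt_true_iff s).mpr hD]
  decide
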